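-- pv_equiv track=rewrite | github.com/JRA2002/python_problems | GEEKFORGEEKS/easy/minimum_integer.py | minimum_integer
-- ===== SOURCE A (Python) =====
-- def minimum_integer(N: int, A: list):
--     S = 0
--     for num in A:
--         S += num
--
--     mini = max(A)
--     for num in A:
--         if S <= N*num and num <= mini:
--             mini = num
--     return mini
-- ===== SOURCE B (Python) =====
-- def minimum_integer(N: int, A: list):
--     S = sum(A)
--     for num in sorted(A):
--         if N * num >= S:
--             return num
--     return max(A)
-- ===== Notes on version B (the rewrite author's own statement) =====
-- stated objective: alternative
-- what changed: Replaced the min-tracking second scan (compare against a running minimum seeded with max(A)) by sort-then-first-match: sort A ascending and return the first element num with N*num >= sum(A), falling back to max(A) when none qualifies.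
import Mathlib
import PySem

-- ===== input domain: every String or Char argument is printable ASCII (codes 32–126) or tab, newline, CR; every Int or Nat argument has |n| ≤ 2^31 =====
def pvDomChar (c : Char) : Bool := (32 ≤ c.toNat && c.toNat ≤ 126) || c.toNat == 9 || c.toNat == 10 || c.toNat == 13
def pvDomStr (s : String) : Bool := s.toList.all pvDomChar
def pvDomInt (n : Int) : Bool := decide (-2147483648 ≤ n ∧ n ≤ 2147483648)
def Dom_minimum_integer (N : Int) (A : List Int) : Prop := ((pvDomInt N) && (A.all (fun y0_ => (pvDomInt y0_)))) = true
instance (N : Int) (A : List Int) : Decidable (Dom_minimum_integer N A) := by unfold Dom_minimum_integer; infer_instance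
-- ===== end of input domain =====

-- B replaces the min-tracking second scan by sort-then-first-match (alternative decomposition, not faster).
-- Equivalence is about the RETURN value; neither program mutates A.
-- ===== PORT A =====
def minimum_integer (N : Int) (A : List Int) : Int :=
  let S := A.foldl (fun s num => s + num) 0
  let mini := (PySem.List.max? A (fun x => x)).getD 0
  A.foldl (fun mini num => if S ≤ N * num ∧ num ≤ mini then num else mini) mini

-- ===== PORT B =====
-- the early-return for-loop of Source B: first num of l with N*num >= S
def firstQualifier (N S : Int) : List Int → Option Int
  | [] => none
  | num :: rest => if S ≤ N * num then some num else firstQualifier N S rest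

def minimum_integer_alt (N : Int) (A : List Int) : Int :=
  let S := A.sum
  match firstQualifier N S (PySem.List.sorted A (fun x => x) false) with
  | some num => num
  | none => (PySem.List.max? A (fun x => x)).getD 0

-- ===== PRECONDITION & SPEC =====
-- Pre_ excludes only the empty list, where Python's max(A) raises ValueError (in both A and B).
def Pre_minimum_integer (N : Int) (A : List Int) : Prop := A ≠ []
instance (N : Int) (A : List Int) : Decidable (Pre_minimum_integer N A) := by unfold Pre_minimum_integer; infer_instance
def pvWitness_minimum_integer : Int × List Int := (2, [3, 1, 2])
def Spec_minimum_integer (N : Int) (A : List Int) (out : Int) : Prop := out = minimum_integer_alt N A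
instance (N : Int) (A : List Int) (out : Int) : Decidable (Spec_minimum_integer N A out) := by unfold Spec_minimum_integer; infer_instance

-- ===== CLAIM (what is proved, stated in full; the proofs are below) =====
def Claim_equal_minimum_integer : Prop := ∀ (N : Int) (A : List Int), Dom_minimum_integer N A → Pre_minimum_integer N A → Spec_minimum_integer N A (minimum_integer N A)

-- ===== LEMMAS AND PROOFS =====

-- A's second loop is a running minimum over the qualifying elements.
theorem foldA_eq_foldl_min_filter (N S : Int) (l : List Int) (m : Int) :
    l.foldl (fun mini num => if S ≤ N * num ∧ num ≤ mini then num else mini) m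
      = (l.filter (fun num => decide (S ≤ N * num))).foldl min m := by
  induction l generalizing m with
  | nil => rfl
  | cons x t ih =>
      by_cases hq : S ≤ N * x
      · simp [hq, ih]
        congr 1
        rw [min_def]; split_ifs <;> omega
      · simp [hq, ih]

-- B's loop is the head of the filtered list.
theorem firstQualifier_eq_head? (N S : Int) (l : List Int) :
    firstQualifier N S l = (l.filter (fun num => decide (S ≤ N * num))).head? := by
  induction l with
  | nil => rfl
  | cons x t ih => by_cases hq : S ≤ N * x <;> simp [firstQualifier, hq, ih]

theorem foldl_min_le_init (m : Int) (l : List Int) : l.foldl min m ≤ m := by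
  induction l generalizing m with
  | nil => exact le_refl m
  | cons x t ih => exact le_trans (ih (min m x)) (min_le_left m x)

theorem foldl_min_le_mem (m x : Int) (l : List Int) (hx : x ∈ l) : l.foldl min m ≤ x := by
  induction l generalizing m with
  | nil => cases hx
  | cons z t ih =>
      rcases List.mem_cons.mp hx with rfl | hx
      · exact le_trans (foldl_min_le_init (min m x) t) (min_le_right m x)
      · exact ih (min m z) hx

theorem le_foldl_min (m x : Int) (l : List Int) (hm : x ≤ m) (hl : ∀ y ∈ l, x ≤ y) :
    x ≤ l.foldl min m := by
  induction l generalizing m with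
  | nil => exact hm
  | cons z t ih =>
      exact ih (min m z) (le_min hm (hl z List.mem_cons_self))
        (fun y hy => hl y (List.mem_cons_of_mem _ hy))

-- ===== VERDICT (by name: the statement is the Claim_ definition above) =====
theorem minimum_integer_spec : Claim_equal_minimum_integer := by
  intro N A _ hA
  unfold Spec_minimum_integer minimum_integer minimum_integer_alt
  simp only
  rw [← List.sum_eq_foldl]
  set S := A.sum with hS
  set p : Int → Bool := fun num => decide (S ≤ N * num) with hp
  -- max(A) is some m0
  obtain ⟨m0, hm0⟩ : ∃ m0, PySem.List.max? A (fun x => x) = some m0 := by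
    cases h : PySem.List.max? A (fun x => x) with
    | none => exact absurd ((PySem.List.max?_eq_none_iff A (fun x => x)).mp h) hA
    | some m => exact ⟨m, rfl⟩
  have hm0mem : m0 ∈ A := PySem.List.max?_mem hm0
  have hm0max : ∀ y ∈ A, y ≤ m0 := PySem.List.max?_isMax hm0
  rw [hm0, foldA_eq_foldl_min_filter, firstQualifier_eq_head?]
  have hperm : ((PySem.List.sorted A (fun x => x) false).filter p).Perm (A.filter p) :=
    (PySem.List.sorted_perm A (fun x => x) false).filter p
  cases hflt : (PySem.List.sorted A (fun x => x) false).filter p with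
  | nil =>
      have h2 : (A.filter p).Perm [] := by rw [← hflt]; exact hperm.symm
      rw [h2.eq_nil]
      rfl
  | cons q rest =>
      simp only [Option.getD_some]
      -- q is the least qualifier
      have hpw : ((PySem.List.sorted A (fun x => x) false).filter p).Pairwise (· ≤ ·) :=
        List.Pairwise.sublist List.filter_sublist (PySem.List.sorted_pairwise A (fun x => x))
      have hqle : ∀ y ∈ rest, q ≤ y := by
        rw [hflt] at hpw; exact (List.pairwise_cons.mp hpw).1
      have hqmemf : q ∈ A.filter p := hperm.mem_iff.mp (hflt ▸ List.mem_cons_self)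
      have hqA : q ∈ A := List.mem_of_mem_filter hqmemf
      have hleast : ∀ y ∈ A.filter p, q ≤ y := by
        intro y hy
        have : y ∈ q :: rest := (hflt ▸ hperm.symm).mem_iff.mp hy
        rcases List.mem_cons.mp this with rfl | h
        · exact le_refl y
        · exact hqle y h
      exact le_antisymm
        (foldl_min_le_mem m0 q (A.filter p) hqmemf)
        (le_foldl_min m0 q (A.filter p) (hm0max q hqA) hleast)
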